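-- pv_equiv track=rewrite | github.com/Aasthaengg/IBMdataset | Python_codes/p02891/s657945190.py | f
-- ===== SOURCE A (Python) =====
-- def f(S):
--     cnt = 0
--     t = 0
--     for i in range(1, len(S)):
--         if S[i-1] == S[i]:
--             t += 1
--         else:
--             t = 0
--         if t % 2 == 1:
--             cnt += 1
--     return cnt
-- ===== SOURCE B (Python) =====
-- def f(S):
--     total = 0
--     i = 0
--     n = len(S)
--     while i < n:
--         j = i + 1
--         while j < n and S[j] == S[i]:
--             j += 1
--         total += (j - i) // 2
--         i = j
--     return total
-- ===== Notes on version B (the rewrite author's own statement) =====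
-- stated objective: simpler
-- what changed: B decomposes S into maximal runs of equal characters and adds the closed form (run length)//2 per run, instead of A's character-by-character running counter with parity tests.
import Mathlib
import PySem

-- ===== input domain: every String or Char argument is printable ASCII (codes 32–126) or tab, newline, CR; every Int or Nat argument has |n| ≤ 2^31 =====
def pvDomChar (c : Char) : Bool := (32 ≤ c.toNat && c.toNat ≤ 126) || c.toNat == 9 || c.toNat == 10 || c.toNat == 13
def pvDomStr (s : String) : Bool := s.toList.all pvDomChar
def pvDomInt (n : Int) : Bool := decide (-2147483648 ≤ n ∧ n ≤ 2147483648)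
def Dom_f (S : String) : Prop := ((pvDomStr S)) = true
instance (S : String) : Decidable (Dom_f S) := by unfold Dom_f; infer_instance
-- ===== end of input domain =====

-- B decomposes S into maximal runs of equal characters and adds (run length)//2 per run,
-- instead of A's character-by-character running streak counter with parity tests (objective: simpler).

-- ===== PORT A =====
-- A's loop body: update the streak t from S[i-1] == S[i], count odd t's.
def bodyA (cs : List Char) (st : Int × Int) (i : Int) : Int × Int :=
  let t : Int := if PySem.List.pyGetD cs (i - 1) ' ' == PySem.List.pyGetD cs i ' ' then st.2 + 1 else 0
  (if PySem.Int.mod t 2 == 1 then st.1 + 1 else st.1, t)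

-- A: cnt = 0; t = 0; for i in range(1, len(S)): ...; return cnt
def f (S : String) : Int :=
  let cs := S.toList
  ((PySem.List.pyRange 1 (PySem.Str.len S) 1).foldl (bodyA cs) (0, 0)).1

-- ===== PORT B =====
-- B: consume one maximal run at a time (the inner `while j` scan = takeWhile over the chars
-- after the run's first character), add (run length) // 2, continue after the run.
def f_altGo : List Char → Int
  | [] => 0
  | c :: rest =>
    let run := rest.takeWhile (fun x => x == c)
    PySem.Int.floordiv ((1 + run.length : Nat) : Int) 2 + f_altGo (rest.drop run.length)
termination_by l => l.length
decreasing_by simp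

def f_alt (S : String) : Int := f_altGo S.toList

-- ===== PRECONDITION & SPEC =====
def Spec_f (S : String) (out : Int) : Prop := out = f_alt S
instance (S : String) (out : Int) : Decidable (Spec_f S out) := by unfold Spec_f; infer_instance

-- ===== CLAIM (what is proved, stated in full; the proofs are below) =====
def Claim_equal_f : Prop := ∀ (S : String), Dom_f S → Spec_f S (f S)

-- ===== LEMMAS AND PROOFS =====

-- A's loop in structural form: carry the previous character instead of indexing.
def stepA (st : Int × Int) (prev c : Char) : Int × Int :=
  let t : Int := if prev == c then st.2 + 1 else 0
  (if PySem.Int.mod t 2 == 1 then st.1 + 1 else st.1, t)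

def loopA : Char → Int × Int → List Char → Int × Int
  | _, st, [] => st
  | prev, st, c :: rest => loopA c (stepA st prev c) rest

-- number of odd values among t+1, …, t+m
def countOdd : Nat → Nat → Nat
  | _, 0 => 0
  | t, m + 1 => (if (t + 1) % 2 = 1 then 1 else 0) + countOdd (t + 1) m

theorem countOdd_closed (m t : Nat) : countOdd t m = (t + m + 1) / 2 - (t + 1) / 2 := by
  induction m generalizing t with
  | zero => simp [countOdd]
  | succ m ih =>
    simp only [countOdd, ih (t + 1)]
    by_cases h : (t + 1) % 2 = 1 <;> simp [h] <;> omega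

-- the pyRange index fold of f is loopA over the tail
theorem fold_eq_loopA (cs : List Char) (m k : Nat) (st : Int × Int)
    (h : k + 1 + m = cs.length) :
    (PySem.List.pyRange ((k : Int) + 1) (cs.length : Int) 1).foldl (bodyA cs) st
      = loopA (cs.getD k ' ') st (cs.drop (k + 1)) := by
  induction m generalizing k st with
  | zero =>
    rw [PySem.List.pyRange_one_eq_nil (by exact_mod_cast by omega)]
    rw [List.drop_of_length_le (by omega)]
    rfl
  | succ m ih =>
    have hk1 : k + 1 < cs.length := by omega
    rw [PySem.List.pyRange_one_cons (by exact_mod_cast by omega)]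
    rw [List.foldl_cons]
    rw [List.drop_eq_getElem_cons hk1]
    simp only [loopA]
    have hb : bodyA cs st ((k : Int) + 1) = stepA st (cs.getD k ' ') (cs.getD (k + 1) ' ') := by
      simp only [bodyA, stepA]
      rw [show ((k : Int) + 1 - 1) = ((k : Nat) : Int) from by ring]
      rw [show ((k : Int) + 1) = (((k + 1 : Nat)) : Int) from by push_cast; ring]
      rw [PySem.List.pyGetD_natCast, PySem.List.pyGetD_natCast]
    rw [hb]
    have hget : cs.getD (k + 1) ' ' = cs[k + 1] := by
      simp [List.getD_eq_getElem?_getD, List.getElem?_eq_getElem hk1]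
    have := ih (k + 1) (stepA st (cs.getD k ' ') (cs.getD (k + 1) ' ')) (by omega)
    rw [hget] at this
    rw [show ((k : Int) + 1 + 1) = (((k + 1 : Nat) : Int) + 1) from by push_cast; ring]
    rw [hget]
    exact this

-- loopA runs through a maximal run of prev, accumulating countOdd odd streak values
theorem loopA_run (rest : List Char) (prev : Char) (cnt : Int) (t : Nat) :
    loopA prev (cnt, (t : Int)) rest =
      loopA prev (cnt + (countOdd t (rest.takeWhile (fun x => x == prev)).length : Int),
                  ((t + (rest.takeWhile (fun x => x == prev)).length : Nat) : Int))
        (rest.drop (rest.takeWhile (fun x => x == prev)).length) := by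
  induction rest generalizing cnt t with
  | nil => simp [loopA, countOdd]
  | cons c r ih =>
    by_cases hc : (c == prev) = true
    · have hcp : c = prev := beq_iff_eq.1 hc
      subst hcp
      rw [List.takeWhile_cons_of_pos (p := fun x => x == c) (by simp)]
      simp only [List.length_cons, List.drop_succ_cons]
      simp only [loopA, stepA, beq_self_eq_true, if_true]
      rw [show ((t : Int) + 1) = (((t + 1 : Nat)) : Int) from by push_cast; ring]
      rw [ih _ (t + 1)]
      congr 2
      · by_cases hpar : (t + 1) % 2 = 1
        · simp [hpar, countOdd]
          split_ifs <;> omega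
        · simp [countOdd, hpar]
          omega
      · push_cast; ring
    · have hcf : (c == prev) = false := beq_eq_false_iff_ne.mpr (by simpa using hc)
      simp [hcf, countOdd]

-- the main induction: loopA with a fresh streak equals B's run recursion
theorem loopA_eq_altGo (n : Nat) (rest : List Char) (prev : Char) (cnt : Int)
    (hn : rest.length ≤ n) :
    (loopA prev (cnt, 0) rest).1 = cnt + f_altGo (prev :: rest) := by
  induction n generalizing rest prev cnt with
  | zero =>
    have : rest = [] := List.eq_nil_of_length_eq_zero (by omega)
    subst this
    simp [loopA, f_altGo, PySem.Int.floordiv]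
  | succ n ih =>
    have h0 := loopA_run rest prev cnt 0
    simp only [Nat.cast_zero, Nat.zero_add] at h0
    set m := (rest.takeWhile (fun x => x == prev)).length with hm
    have hclosed : (countOdd 0 m : Int) = PySem.Int.floordiv ((1 + m : Nat) : Int) 2 := by
      rw [countOdd_closed]
      rw [show PySem.Int.floordiv (((1 + m : Nat)) : Int) 2 = (((1 + m) / 2 : Nat) : Int) from by
        exact_mod_cast PySem.Int.floordiv_natCast (1 + m) 2]
      congr 1
      omega
    have hfg : f_altGo (prev :: rest)
        = PySem.Int.floordiv ((1 + m : Nat) : Int) 2 + f_altGo (rest.drop m) := by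
      rw [f_altGo]
    rw [h0, hfg]
    cases hd : rest.drop m with
    | nil =>
      simp [loopA, f_altGo, hclosed]
    | cons c r' =>
      have hcne : (c == prev) = false := by
        have hdw : rest.drop m = rest.dropWhile (fun x => x == prev) := by
          rw [hm]
          nth_rewrite 2 [← List.takeWhile_append_dropWhile (p := fun x => x == prev) (l := rest)]
          rw [List.drop_left]
        rw [hdw] at hd
        have := List.dropWhile_get_zero_not (fun x => x == prev) rest (by rw [hd]; simp)
        simp [hd] at this
        simpa using this
      have hpc : (prev == c) = false := by
        rw [beq_eq_false_iff_ne] at hcne ⊢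
        exact fun h => hcne h.symm
      simp only [loopA, stepA, hpc, Bool.false_eq_true, if_false]
      rw [if_neg (show ¬ ((PySem.Int.mod 0 2 == 1) = true) from by decide)]
      have hlen : r'.length ≤ n := by
        have h1 : (rest.drop m).length = rest.length - m := List.length_drop ..
        rw [hd] at h1
        simp at h1
        omega
      rw [ih r' c _ hlen, hclosed]
      ring

-- ===== VERDICT (by name: the statement is the Claim_ definition above) =====
theorem f_spec : Claim_equal_f := by
  intro S _
  simp only [Spec_f, f, f_alt, PySem.Str.len_eq]
  cases hcs : S.toList with
  | nil =>
    simp only [List.length_nil, Nat.cast_zero]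
    rw [PySem.List.pyRange_one_eq_nil (by norm_num), f_altGo]
    rfl
  | cons c rest =>
    rw [show PySem.List.pyRange 1 (((c :: rest).length : Nat) : Int) 1
          = PySem.List.pyRange (((0 : Nat) : Int) + 1) (((c :: rest).length : Nat) : Int) 1 from by
        norm_num]
    rw [fold_eq_loopA (c :: rest) rest.length 0 (0, 0) (by simp [Nat.add_comm])]
    simp only [List.getD_cons_zero, List.drop_succ_cons, List.drop_zero]
    rw [loopA_eq_altGo rest.length rest c 0 le_rfl]
    ring
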